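-- pv_equiv track=rewrite | github.com/viictor-h-amaral/Python_from_questao_olimpica_to_codigo | valida_caso.py | separar_questoes_por_nota
-- ===== SOURCE A (Python) =====
-- def separar_questoes_por_nota(questoes):
--
-- 	notas0 = []
-- 	notas1 = []
-- 	notas2 = []
--
-- 	for index_questao in range( len(questoes) ):
--
-- 		match questoes[index_questao]:
-- 			case 0:
-- 				notas0.append(index_questao)
-- 			case 1:
-- 				notas1.append(index_questao)
-- 			case 2:
-- 				notas2.append(index_questao)
--
-- 	indexes_separados_por_nota = [notas0, notas1, notas2]
--
-- 	return indexes_separados_por_nota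
-- ===== SOURCE B (Python) =====
-- def separar_questoes_por_nota(questoes):
--     notas0 = [i for i, v in enumerate(questoes) if v == 0]
--     notas1 = [i for i, v in enumerate(questoes) if v == 1]
--     notas2 = [i for i, v in enumerate(questoes) if v == 2]
--     return [notas0, notas1, notas2]
-- ===== Notes on version B (the rewrite author's own statement) =====
-- stated objective: simpler
-- what changed: Replaces the single index loop with a match that appends into three mutable lists by three independent enumerate-based list comprehensions, one per grade.
import Mathlib
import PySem

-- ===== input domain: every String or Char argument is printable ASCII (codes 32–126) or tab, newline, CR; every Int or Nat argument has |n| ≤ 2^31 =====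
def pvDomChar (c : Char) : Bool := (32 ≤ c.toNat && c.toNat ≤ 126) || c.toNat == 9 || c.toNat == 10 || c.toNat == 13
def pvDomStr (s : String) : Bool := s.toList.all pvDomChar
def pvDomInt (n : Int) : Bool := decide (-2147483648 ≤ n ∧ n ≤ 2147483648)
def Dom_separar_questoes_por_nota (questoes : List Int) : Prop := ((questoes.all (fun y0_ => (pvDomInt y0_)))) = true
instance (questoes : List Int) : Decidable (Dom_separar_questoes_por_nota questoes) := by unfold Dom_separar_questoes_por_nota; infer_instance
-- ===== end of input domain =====

-- B replaces A's single loop-with-match filling three lists by three independent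
-- per-grade scans (list comprehensions) — a simpler decomposition, same cost.

-- ===== PORT A =====
-- loop body of A: match questoes[i] with 0/1/2 appending i to the matching bucket
def pvStepA (qs : List Int) (acc : List Int × List Int × List Int) (i : Int) :
    List Int × List Int × List Int :=
  match PySem.List.pyGet? qs i with
  | some 0 => (acc.1 ++ [i], acc.2.1, acc.2.2)
  | some 1 => (acc.1, acc.2.1 ++ [i], acc.2.2)
  | some 2 => (acc.1, acc.2.1, acc.2.2 ++ [i])
  | _ => acc

def separar_questoes_por_nota (questoes : List Int) : List (List Int) :=
  let r := (PySem.List.pyRange 0 questoes.length 1).foldl (pvStepA questoes) ([], [], [])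
  [r.1, r.2.1, r.2.2]

-- ===== PORT B =====
-- one comprehension: [i for i, v in enumerate(questoes) if v == nota]
def pvBucket (nota : Int) (questoes : List Int) : List Int :=
  ((PySem.List.enumerate questoes 0).filter (fun p => p.2 == nota)).map (·.1)

def separar_questoes_por_nota_alt (questoes : List Int) : List (List Int) :=
  [pvBucket 0 questoes, pvBucket 1 questoes, pvBucket 2 questoes]

-- ===== PRECONDITION & SPEC =====
def Spec_separar_questoes_por_nota (questoes : List Int) (out : List (List Int)) : Prop := out = separar_questoes_por_nota_alt questoes
instance (questoes : List Int) (out : List (List Int)) : Decidable (Spec_separar_questoes_por_nota questoes out) := by unfold Spec_separar_questoes_por_nota; infer_instance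

-- ===== CLAIM (what is proved, stated in full; the proofs are below) =====
def Claim_equal_separar_questoes_por_nota : Prop := ∀ (questoes : List Int), Dom_separar_questoes_por_nota questoes → Spec_separar_questoes_por_nota questoes (separar_questoes_por_nota questoes)

-- ===== LEMMAS AND PROOFS =====

def pvFilt (nota : Int) (qs : List Int) (s : Int) : List Int :=
  ((PySem.List.enumerate qs s).filter (fun p => p.2 == nota)).map (·.1)

lemma pvFoldA (qs : List Int) : ∀ (pre a b c : List Int),
    (PySem.List.pyRange (pre.length : Int) ((pre.length : Int) + qs.length) 1).foldl
      (pvStepA (pre ++ qs)) (a, b, c)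
    = (a ++ pvFilt 0 qs pre.length, b ++ pvFilt 1 qs pre.length, c ++ pvFilt 2 qs pre.length) := by
  induction qs with
  | nil =>
      intro pre a b c
      simp [PySem.List.pyRange_one_eq_nil, pvFilt, PySem.List.enumerate_nil]
  | cons x xs ih =>
      intro pre a b c
      have hlt : (pre.length : Int) < (pre.length : Int) + (x :: xs).length := by
        simp only [List.length_cons]; push_cast; omega
      rw [PySem.List.pyRange_one_cons hlt]
      have hget : PySem.List.pyGet? (pre ++ x :: xs) (pre.length : Int) = some x :=
        PySem.List.pyGet?_append_length pre xs x
      have hpre : ((pre ++ [x]).length : Int) = (pre.length : Int) + 1 := by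
        simp
      have hassoc : pre ++ x :: xs = (pre ++ [x]) ++ xs := by simp
      have hend : ((pre.length : Int) + 1) + (xs.length : Int)
          = (pre.length : Int) + ((x :: xs).length : Int) := by simp; omega
      have ihx := ih (pre ++ [x])
      rw [hpre, hassoc.symm, hend] at ihx
      simp only [List.foldl_cons]
      have hfilt : ∀ nota : Int,
          pvFilt nota (x :: xs) pre.length
          = (if x == nota then [(pre.length : Int)] else []) ++ pvFilt nota xs ((pre.length : Int) + 1) := by
        intro nota
        simp only [pvFilt, PySem.List.enumerate_cons, List.filter_cons]
        by_cases h : x = nota <;> simp [h]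
      by_cases hx0 : x = 0
      · subst hx0
        have hstep : pvStepA (pre ++ 0 :: xs) (a, b, c) (pre.length : Int)
            = (a ++ [(pre.length : Int)], b, c) := by
          simp [pvStepA]
        rw [hstep, ihx, hfilt 0, hfilt 1, hfilt 2]
        simp [List.append_assoc]
      · by_cases hx1 : x = 1
        · subst hx1
          have hstep : pvStepA (pre ++ 1 :: xs) (a, b, c) (pre.length : Int)
              = (a, b ++ [(pre.length : Int)], c) := by
            simp [pvStepA]
          rw [hstep, ihx, hfilt 0, hfilt 1, hfilt 2]
          simp [List.append_assoc]
        · by_cases hx2 : x = 2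
          · subst hx2
            have hstep : pvStepA (pre ++ 2 :: xs) (a, b, c) (pre.length : Int)
                = (a, b, c ++ [(pre.length : Int)]) := by
              simp [pvStepA]
            rw [hstep, ihx, hfilt 0, hfilt 1, hfilt 2]
            simp [List.append_assoc]
          · have hstep : pvStepA (pre ++ x :: xs) (a, b, c) (pre.length : Int)
                = (a, b, c) := by
              unfold pvStepA
              rw [hget]
              split
              next h => exact absurd (Option.some.inj h) hx0
              next h => exact absurd (Option.some.inj h) hx1
              next h => exact absurd (Option.some.inj h) hx2
              next => rfl
            rw [hstep, ihx, hfilt 0, hfilt 1, hfilt 2]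
            simp [hx0, hx1, hx2]

-- ===== VERDICT (by name: the statement is the Claim_ definition above) =====
theorem separar_questoes_por_nota_spec : Claim_equal_separar_questoes_por_nota := by
  intro qs _
  unfold Spec_separar_questoes_por_nota separar_questoes_por_nota separar_questoes_por_nota_alt
  have h := pvFoldA qs [] [] [] []
  simp only [List.length_nil, Int.natCast_zero, List.nil_append, zero_add] at h
  rw [h]
  rfl
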